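-- pv_equiv track=rewrite | github.com/marchinn/practice | leetcode/2389. Longest Subsequence With Limited Sum/Solution.py | answerQueries
-- ===== SOURCE A (Python) =====
-- from typing import List
--
-- def answerQueries(nums: List[int], queries: List[int]) -> List[int]:
--     prefix = []
--     nums.sort()
--     numSum = 0
--     for num in nums:
--         numSum += num
--         prefix.append(numSum)
--
--     answer = []
--     for query in queries:
--         filteredPrefix = [x for x in prefix if x <= query]
--         answer.append(len(filteredPrefix))
--
--     return answer
-- ===== SOURCE B (Python) =====
-- from typing import List
--
-- def answerQueries(nums: List[int], queries: List[int]) -> List[int]: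
--     prefix = []
--     s = 0
--     for v in sorted(nums):
--         s += v
--         prefix.append(s)
--     prefix.sort()  # prefix sums need not be monotone when nums has negatives
--     answer = []
--     for query in queries:
--         lo, hi = 0, len(prefix)
--         while lo < hi:
--             mid = (lo + hi) // 2
--             if prefix[mid] <= query:
--                 lo = mid + 1
--             else:
--                 hi = mid
--         answer.append(lo)
--     return answer
-- ===== Notes on version B (the rewrite author's own statement) =====
-- stated objective: faster
-- what changed: Replaces A's per-query linear scan over the prefix sums with one extra sort of the prefix sums and a hand-written binary search (bisect_right) per query.
import Mathlib
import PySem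

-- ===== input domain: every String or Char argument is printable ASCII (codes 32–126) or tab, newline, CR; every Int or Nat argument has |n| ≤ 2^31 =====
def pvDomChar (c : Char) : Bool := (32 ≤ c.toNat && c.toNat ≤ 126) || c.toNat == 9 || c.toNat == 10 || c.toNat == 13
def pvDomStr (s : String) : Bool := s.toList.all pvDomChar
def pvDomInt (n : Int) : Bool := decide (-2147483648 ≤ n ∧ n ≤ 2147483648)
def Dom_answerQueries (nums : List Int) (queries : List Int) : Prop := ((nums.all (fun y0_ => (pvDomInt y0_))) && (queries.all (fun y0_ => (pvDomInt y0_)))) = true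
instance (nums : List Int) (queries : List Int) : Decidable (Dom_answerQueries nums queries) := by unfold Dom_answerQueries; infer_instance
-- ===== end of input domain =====

-- B replaces A's per-query linear scan of the prefix sums with one extra sort of the
-- prefix sums plus a binary search per query (asymptotically faster). A sorts `nums`
-- in place (a side effect B does not reproduce via sorted()); the equivalence proved
-- here is about the return value.

-- ===== PORT A =====
-- prefix-sum list built exactly as A's first loop (numSum accumulator, append)
def pvPrefixA (ns : List Int) : Int × List Int :=
  ns.foldl (fun st num => (st.1 + num, st.2 ++ [st.1 + num])) (0, [])

def answerQueries (nums : List Int) (queries : List Int) : List Int :=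
  let pref := (pvPrefixA (PySem.List.sorted nums (fun x => x) false)).2
  queries.foldl (fun answer query =>
    answer ++ [((pref.filter (fun x => x ≤ query)).length : Int)]) []

-- ===== PORT B =====
-- B's first loop is the same accumulation; then B sorts the prefix list and binary-searches.
def pvPrefixB (ns : List Int) : Int × List Int :=
  ns.foldl (fun st v => (st.1 + v, st.2 ++ [st.1 + v])) (0, [])

-- hand-written bisect_right of Source B; prefix[mid] is accessed with 0 ≤ mid < len(prefix),
-- so `getD mid 0` is exact there
def pvBisect (p : List Int) (q : Int) (lo hi : Nat) : Nat :=
  if _h : lo < hi then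
    let mid := (lo + hi) / 2
    if p.getD mid 0 ≤ q then pvBisect p q (mid + 1) hi else pvBisect p q lo mid
  else lo
termination_by hi - lo
decreasing_by all_goals omega

def answerQueries_alt (nums : List Int) (queries : List Int) : List Int :=
  let prefix0 := (pvPrefixB (PySem.List.sorted nums (fun x => x) false)).2
  let pref := PySem.List.sorted prefix0 (fun x => x) false
  queries.foldl (fun answer query =>
    answer ++ [(pvBisect pref query 0 pref.length : Int)]) []

-- ===== PRECONDITION & SPEC =====
def Spec_answerQueries (nums : List Int) (queries : List Int) (out : List Int) : Prop := out = answerQueries_alt nums queries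
instance (nums : List Int) (queries : List Int) (out : List Int) : Decidable (Spec_answerQueries nums queries out) := by unfold Spec_answerQueries; infer_instance

-- ===== CLAIM (what is proved, stated in full; the proofs are below) =====
def Claim_equal_answerQueries : Prop := ∀ (nums : List Int) (queries : List Int), Dom_answerQueries nums queries → Spec_answerQueries nums queries (answerQueries nums queries)

-- ===== LEMMAS AND PROOFS =====

-- splitting a list at the point where a predicate stops holding determines countP
lemma countP_split (pred : Int → Bool) (l : List Int) (k : Nat) (hk : k ≤ l.length)
    (h1 : ∀ i (h : i < l.length), i < k → pred l[i] = true)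
    (h2 : ∀ i (h : i < l.length), k ≤ i → pred l[i] = false) :
    l.countP pred = k := by
  induction l generalizing k with
  | nil => simp only [List.length_nil, Nat.le_zero] at hk; simp [hk]
  | cons a t ih =>
    cases k with
    | zero =>
      rw [List.countP_cons]
      have ha : pred a = false := h2 0 (by simp) (Nat.zero_le 0)
      have : t.countP pred = 0 := by
        apply ih 0 (Nat.zero_le _)
        · intro i h hi; omega
        · intro i h _; exact h2 (i + 1) (by simpa using Nat.succ_lt_succ h) (Nat.zero_le _)
      simp [this, ha]
    | succ k' =>
      rw [List.countP_cons]
      have ha : pred a = true := h1 0 (by simp) (Nat.succ_pos _)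
      have ht : t.countP pred = k' := by
        apply ih k' (by simpa using hk)
        · intro i h hi
          exact h1 (i + 1) (by simpa using Nat.succ_lt_succ h) (by omega)
        · intro i h hi
          exact h2 (i + 1) (by simpa using Nat.succ_lt_succ h) (by omega)
      simp [ht, ha]

-- binary-search invariant: on a ≤-sorted list, pvBisect computes countP (· ≤ q)
lemma pvBisect_eq (p : List Int) (q : Int)
    (hs : ∀ i j (hi : i < p.length) (hj : j < p.length), i ≤ j → p[i] ≤ p[j]) :
    ∀ lo hi, lo ≤ hi → hi ≤ p.length →
    (∀ i (h : i < p.length), i < lo → p[i] ≤ q) →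
    (∀ i (h : i < p.length), hi ≤ i → ¬ p[i] ≤ q) →
    pvBisect p q lo hi = p.countP (fun x => decide (x ≤ q)) := by
  intro lo hi
  induction lo, hi using pvBisect.induct p q with
  | case1 lo hi h mid hle ih =>
    intro _ hhi hlow hhigh
    have hmdef : mid = (lo + hi) / 2 := rfl
    rw [pvBisect, dif_pos h, ← hmdef, if_pos hle]
    have hmid : mid < p.length := by omega
    apply ih (by omega) hhi
    · intro i hilen hilo
      have : p[i] ≤ p[mid] := hs i mid hilen hmid (by omega)
      have hm : p[mid] ≤ q := by
        have := hle; rwa [List.getD_eq_getElem p 0 hmid] at this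
      exact le_trans this hm
    · exact hhigh
  | case2 lo hi h mid hgt ih =>
    intro hlohi hhi hlow hhigh
    have hmdef : mid = (lo + hi) / 2 := rfl
    rw [pvBisect, dif_pos h, ← hmdef, if_neg hgt]
    have hmid : mid < p.length := by omega
    apply ih (by omega) (by omega) hlow
    · intro i hilen hmi
      have hpm : ¬ p[mid] ≤ q := by
        rwa [List.getD_eq_getElem p 0 hmid] at hgt
      intro hle'
      exact hpm (le_trans (hs mid i hmid hilen hmi) hle')
  | case3 lo hi h =>
    intro hlohi hhi hlow hhigh
    rw [pvBisect, dif_neg h]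
    have hk : lo = hi := by omega
    subst hk
    exact (countP_split _ p lo hhi
      (fun i hi' hil => by simpa using hlow i hi' hil)
      (fun i hi' hil => by simpa using hhigh i hi' hil)).symm

-- per query, B's binary search on sorted(prefix) equals A's filter count on prefix
lemma per_query (prefix0 : List Int) (q : Int) :
    (pvBisect (PySem.List.sorted prefix0 (fun x => x) false) q 0
        (PySem.List.sorted prefix0 (fun x => x) false).length : Int)
      = ((prefix0.filter (fun x => x ≤ q)).length : Int) := by
  set p := PySem.List.sorted prefix0 (fun x => x) false with hp
  have hpair : p.Pairwise (· ≤ ·) := by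
    simpa using PySem.List.sorted_pairwise (xs := prefix0) (key := fun x => x)
  have hs : ∀ i j (hi : i < p.length) (hj : j < p.length), i ≤ j → p[i] ≤ p[j] := by
    intro i j hi hj hij
    rcases Nat.lt_or_ge i j with hlt | hge
    · exact (List.pairwise_iff_getElem.mp hpair) i j hi hj hlt
    · have : i = j := by omega
      subst this; rfl
  have hb := pvBisect_eq p q hs 0 p.length (Nat.zero_le _) le_rfl
    (fun i h hi0 => absurd hi0 (Nat.not_lt_zero i))
    (fun i h hle => absurd h (by omega))
  have hperm : p.Perm prefix0 := PySem.List.sorted_perm prefix0 (fun x => x) false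
  have hcnt : p.countP (fun x => decide (x ≤ q)) = prefix0.countP (fun x => decide (x ≤ q)) :=
    hperm.countP_eq _
  rw [hb, hcnt, ← List.countP_eq_length_filter]

lemma foldl_push (f : Int → Int) (qs : List Int) (acc : List Int) :
    qs.foldl (fun a q => a ++ [f q]) acc = acc ++ qs.map f := by
  induction qs generalizing acc with
  | nil => simp
  | cons x t ih => simp [ih]

theorem answerQueries_eq_alt (nums queries : List Int) :
    answerQueries nums queries = answerQueries_alt nums queries := by
  simp only [answerQueries, answerQueries_alt]
  rw [foldl_push (fun query => (((pvPrefixA (PySem.List.sorted nums (fun x => x) false)).2.filter (fun x => x ≤ query)).length : Int)),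
      foldl_push (fun query => (pvBisect (PySem.List.sorted (pvPrefixB (PySem.List.sorted nums (fun x => x) false)).2 (fun x => x) false) query 0
        (PySem.List.sorted (pvPrefixB (PySem.List.sorted nums (fun x => x) false)).2 (fun x => x) false).length : Int))]
  simp only [List.nil_append]
  apply List.map_congr_left
  intro q _
  exact (per_query _ q).symm

-- ===== VERDICT (by name: the statement is the Claim_ definition above) =====
theorem answerQueries_spec : Claim_equal_answerQueries := by
  intro nums queries _
  unfold Spec_answerQueries
  exact answerQueries_eq_alt nums queries
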